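-- pv_equiv track=rewrite | github.com/ShapeLayer/training | tasks/online_judge/baekjoon/python/6131.py | compute
-- ===== SOURCE A (Python) =====
-- def compute(n: int) -> int:
--     cnt = 0
--     for i in range(1, n):
--         if i ** 2 - (i - 1) ** 2 > n:
--             break
--         for j in range(1, i + 1):
--             if i ** 2 - j ** 2 == n:
--                 cnt += 1
--     return cnt
-- ===== SOURCE B (Python) =====
-- def compute(n: int) -> int:
--     # count representations n = i*i - j*j with 1 <= j <= i as factor pairs
--     # d*e = n, d < e, d and e of equal parity (d = i-j, e = i+j)
--     cnt = 0
--     d = 1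
--     while d * d < n:
--         if n % d == 0 and (d + n // d) % 2 == 0:
--             cnt += 1
--         d += 1
--     return cnt
-- ===== Notes on version B (the rewrite author's own statement) =====
-- stated objective: faster
-- what changed: replaces the O(n^2) double loop over (i,j) testing i^2-j^2=n with a single O(sqrt(n)) scan over divisors d with d^2<n, counting factor pairs d*(n//d)=n of equal parity
import Mathlib
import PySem

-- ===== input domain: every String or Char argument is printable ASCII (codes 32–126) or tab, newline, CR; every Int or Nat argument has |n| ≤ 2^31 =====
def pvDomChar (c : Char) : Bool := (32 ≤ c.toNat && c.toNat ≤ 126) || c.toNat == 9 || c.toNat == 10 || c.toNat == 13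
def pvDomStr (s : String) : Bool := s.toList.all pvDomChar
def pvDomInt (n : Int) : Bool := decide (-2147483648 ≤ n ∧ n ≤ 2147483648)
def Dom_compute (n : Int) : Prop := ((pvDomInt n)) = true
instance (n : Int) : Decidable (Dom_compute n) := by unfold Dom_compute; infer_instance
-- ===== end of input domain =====

-- B replaces A's O(n^2) double loop over (i, j) with a single scan over divisors d
-- with d*d < n, counting factor pairs d*(n//d) = n of equal parity (objective: faster).

-- ===== PORT A =====
-- inner loop: for j in range(1, i + 1): if i ** 2 - j ** 2 == n: cnt += 1
def computeInner (n i cnt : Int) : Int :=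
  (PySem.List.pyRange 1 (i + 1) 1).foldl (fun c j => if i ^ 2 - j ^ 2 = n then c + 1 else c) cnt

-- outer loop: for i in range(1, n): if i ** 2 - (i - 1) ** 2 > n: break; <inner loop>
def computeOuter (n : Int) : List Int → Int → Int
  | [], cnt => cnt
  | i :: rest, cnt =>
    if i ^ 2 - (i - 1) ^ 2 > n then cnt else computeOuter n rest (computeInner n i cnt)

def compute (n : Int) : Int := computeOuter n (PySem.List.pyRange 1 n 1) 0

-- ===== PORT B =====
-- termination of B's while loop: while the guard d*d < n holds, d < n, so n - d shrinks
theorem pvAltLt (d n : Int) (h : d * d < n) : d < n := by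
  nlinarith [sq_nonneg d, sq_nonneg (d - 1)]

-- while d * d < n: if n % d == 0 and (d + n // d) % 2 == 0: cnt += 1; d += 1
def altLoop (n d cnt : Int) : Int :=
  if h : d * d < n then
    altLoop n (d + 1)
      (if PySem.Int.mod n d = 0 ∧ PySem.Int.mod (d + PySem.Int.floordiv n d) 2 = 0 then cnt + 1
       else cnt)
  else cnt
termination_by (n - d).toNat
decreasing_by have := pvAltLt d n h; omega

def compute_alt (n : Int) : Int := altLoop n 1 0

-- ===== PRECONDITION & SPEC =====
def Spec_compute (n : Int) (out : Int) : Prop := out = compute_alt n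
instance (n : Int) (out : Int) : Decidable (Spec_compute n out) := by unfold Spec_compute; infer_instance

-- ===== CLAIM (what is proved, stated in full; the proofs are below) =====
def Claim_equal_compute : Prop := ∀ (n : Int), Dom_compute n → Spec_compute n (compute n)

-- ===== LEMMAS AND PROOFS =====

-- B's loop condition, in plain Int arithmetic (valid for divisor x ≥ 1):
-- x * x < n ∧ n % x = 0 ∧ (x + n / x) % 2 = 0, written inline below

-- half point: A's break fires exactly when i > (n+1)/2
def halfM (n : Int) : Int := (n + 1) / 2

-- A's inner count for a fixed i
noncomputable def cntA (n i : Int) : Nat := ((Finset.Ico 1 (i + 1)).filter (fun j => i ^ 2 - j ^ 2 = n)).card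

theorem count_pyRange_eq_card (p : Int → Prop) [DecidablePred p] (a b : Int) :
    ((PySem.List.pyRange a b 1).countP (fun x => decide (p x)) : Int)
      = ((Finset.Ico a b).filter p).card := by
  rw [List.countP_eq_length_filter]
  have hnd : ((PySem.List.pyRange a b 1).filter (fun x => decide (p x))).Nodup :=
    (PySem.List.nodup_pyRange_one a b).filter _
  rw [← List.toFinset_card_of_nodup hnd]
  congr 2
  ext x
  simp [PySem.List.mem_pyRange_one, Finset.mem_Ico, Finset.mem_filter, and_comm]

theorem inner_eq (n i cnt : Int) : computeInner n i cnt = cnt + cntA n i := by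
  unfold computeInner cntA
  rw [← count_pyRange_eq_card (fun j => i ^ 2 - j ^ 2 = n) 1 (i + 1)]
  generalize PySem.List.pyRange 1 (i + 1) 1 = l
  induction l generalizing cnt with
  | nil => simp
  | cons x xs ih =>
    by_cases h : i ^ 2 - x ^ 2 = n
    · simp [h, ih]; ring
    · simp [h, ih]

theorem ico_insert (a b : Int) (h : a < b) :
    Finset.Ico a b = insert a (Finset.Ico (a + 1) b) := by
  ext x; simp [Finset.mem_Ico, Finset.mem_insert]; omega

theorem outer_eq (n : Int) : ∀ (k : Nat) (a cnt : Int), (n - a).toNat ≤ k →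
    computeOuter n (PySem.List.pyRange a n 1) cnt
      = cnt + ∑ i ∈ (Finset.Ico a n).filter (fun i => i ≤ halfM n), (cntA n i : Int) := by
  intro k
  induction k with
  | zero =>
    intro a cnt hk
    rw [PySem.List.pyRange_one_eq_nil (by omega), Finset.Ico_eq_empty (by omega)]
    simp [computeOuter]
  | succ k ih =>
    intro a cnt hk
    by_cases hab : a < n
    · rw [PySem.List.pyRange_one_cons hab]
      show (if a ^ 2 - (a - 1) ^ 2 > n then cnt
            else computeOuter n (PySem.List.pyRange (a + 1) n 1) (computeInner n a cnt)) = _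
      have hbreak : a ^ 2 - (a - 1) ^ 2 = 2 * a - 1 := by ring
      by_cases hM : a ≤ halfM n
      · have hnotbreak : ¬ (a ^ 2 - (a - 1) ^ 2 > n) := by
          rw [hbreak]; unfold halfM at hM; omega
        rw [if_neg hnotbreak, inner_eq, ih (a + 1) (cnt + cntA n a) (by omega)]
        rw [ico_insert a n hab, Finset.filter_insert, if_pos hM,
          Finset.sum_insert (by simp [Finset.mem_filter, Finset.mem_Ico])]
        ring
      · have hbr : a ^ 2 - (a - 1) ^ 2 > n := by rw [hbreak]; unfold halfM at hM; omega
        rw [if_pos hbr]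
        have : (Finset.Ico a n).filter (fun i => i ≤ halfM n) = ∅ := by
          ext x; simp [Finset.mem_Ico, Finset.mem_filter]; intro h1 h2; omega
        simp [this]
    · rw [PySem.List.pyRange_one_eq_nil (by omega), Finset.Ico_eq_empty (by omega)]
      simp [computeOuter]

theorem alt_eq (n : Int) : ∀ (k : Nat) (d cnt : Int), 1 ≤ d → (n - d).toNat ≤ k →
    altLoop n d cnt = cnt + (((Finset.Ico d n).filter (fun x => x * x < n ∧ n % x = 0 ∧ (x + n / x) % 2 = 0)).card : Int) := by
  intro k
  induction k with
  | zero =>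
    intro d cnt hd hk
    rw [altLoop]
    have hnd : ¬ d * d < n := fun h => absurd (pvAltLt d n h) (by omega)
    rw [dif_neg hnd, Finset.Ico_eq_empty (by omega)]
    simp
  | succ k ih =>
    intro d cnt hd hk
    rw [altLoop]
    by_cases hg : d * d < n
    · have hdn : d < n := pvAltLt d n hg
      rw [dif_pos hg, ih (d + 1) _ (by omega) (by omega)]
      have hcond : (PySem.Int.mod n d = 0 ∧ PySem.Int.mod (d + PySem.Int.floordiv n d) 2 = 0)
          ↔ (d * d < n ∧ n % d = 0 ∧ (d + n / d) % 2 = 0) := by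
        rw [PySem.Int.mod_eq_emod_of_pos (by omega : (0:Int) < d),
          PySem.Int.mod_eq_emod_of_pos (by norm_num : (0:Int) < 2),
          PySem.Int.floordiv_eq_ediv_of_pos (by omega : (0:Int) < d)]
        constructor
        · rintro ⟨h1, h2⟩; exact ⟨hg, h1, h2⟩
        · rintro ⟨_, h1, h2⟩; exact ⟨h1, h2⟩
      rw [ico_insert d n hdn, Finset.filter_insert]
      by_cases hc : (d * d < n ∧ n % d = 0 ∧ (d + n / d) % 2 = 0)
      · rw [if_pos ((hcond.2 hc)), if_pos hc,
          Finset.card_insert_of_notMem (by simp [Finset.mem_filter, Finset.mem_Ico])]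
        push_cast; ring
      · rw [if_neg (fun h => hc (hcond.1 h)), if_neg hc]
    · rw [dif_neg hg]
      have : (Finset.Ico d n).filter (fun x => x * x < n ∧ n % x = 0 ∧ (x + n / x) % 2 = 0) = ∅ := by
        ext x
        simp only [Finset.mem_filter, Finset.mem_Ico, Finset.notMem_empty, iff_false]
        rintro ⟨⟨hx1, _⟩, hx2, _⟩
        have : d * d ≤ x * x := by nlinarith
        omega
      rw [this]
      simp

-- the bijection (i, j) ↦ i - j between A's solution pairs and B's divisors
theorem card_sigma_eq_card_divisors (n : Int) :
    (((Finset.Ico 1 n).filter (fun i => i ≤ halfM n)).sigma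
        (fun i => (Finset.Ico 1 (i + 1)).filter (fun j => i ^ 2 - j ^ 2 = n))).card
      = ((Finset.Ico 1 n).filter (fun x => x * x < n ∧ n % x = 0 ∧ (x + n / x) % 2 = 0)).card := by
  refine Finset.card_bij' (fun a _ => a.1 - a.2)
    (fun d _ => ⟨(d + n / d) / 2, (n / d - d) / 2⟩) ?_ ?_ ?_ ?_
  · -- forward membership
    rintro ⟨i, j⟩ ha
    simp only [Finset.mem_sigma, Finset.mem_filter, Finset.mem_Ico] at ha
    obtain ⟨⟨⟨hi1, hi2⟩, hiM⟩, ⟨hj1, hj2⟩, heq⟩ := ha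
    have hji : j < i := by nlinarith
    have hne : n = (i - j) * (i + j) := by nlinarith
    have hdiv : n / (i - j) = i + j := by
      rw [hne, Int.mul_ediv_cancel_left _ (by omega)]
    have hsq : (i - j) * (i - j) < n := by nlinarith
    have hmod : n % (i - j) = 0 := by rw [hne]; exact Int.mul_emod_right _ _
    simp only [Finset.mem_filter, Finset.mem_Ico]
    exact ⟨⟨by omega, pvAltLt _ _ hsq⟩, hsq, hmod, by rw [hdiv]; omega⟩
  · -- backward membership
    rintro d hd
    simp only [Finset.mem_filter, Finset.mem_Ico] at hd
    obtain ⟨⟨hd1, hd2⟩, hsq, hmod, hpar⟩ := hd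
    have hdvd : d ∣ n := Int.dvd_of_emod_eq_zero hmod
    obtain ⟨e, he⟩ := hdvd
    have hdiv : n / d = e := by rw [he, Int.mul_ediv_cancel_left _ (by omega)]
    dsimp only
    rw [hdiv] at hpar ⊢
    have hde : d < e := by nlinarith
    have h2i : 2 * ((d + e) / 2) = d + e := by omega
    have h2j : 2 * ((e - d) / 2) = e - d := by omega
    have hsum : d + e ≤ n + 1 := by nlinarith
    have hn2 : 2 ≤ n := by nlinarith
    simp only [Finset.mem_sigma, Finset.mem_filter, Finset.mem_Ico]
    refine ⟨⟨⟨by omega, by omega⟩, by unfold halfM; omega⟩, ⟨by omega, by omega⟩, by nlinarith⟩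
  · -- left inverse
    rintro ⟨i, j⟩ ha
    simp only [Finset.mem_sigma, Finset.mem_filter, Finset.mem_Ico] at ha
    obtain ⟨⟨⟨hi1, hi2⟩, hiM⟩, ⟨hj1, hj2⟩, heq⟩ := ha
    have hji : j < i := by nlinarith
    have hne : n = (i - j) * (i + j) := by nlinarith
    have hdiv : n / (i - j) = i + j := by
      rw [hne, Int.mul_ediv_cancel_left _ (by omega)]
    dsimp only
    rw [hdiv]
    simp only [Sigma.mk.injEq, heq_eq_eq]
    constructor <;> omega
  · -- right inverse
    rintro d hd
    simp only [Finset.mem_filter, Finset.mem_Ico] at hd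
    obtain ⟨⟨hd1, hd2⟩, hsq, hmod, hpar⟩ := hd
    have hdvd : d ∣ n := Int.dvd_of_emod_eq_zero hmod
    obtain ⟨e, he⟩ := hdvd
    have hdiv : n / d = e := by rw [he, Int.mul_ediv_cancel_left _ (by omega)]
    rw [hdiv] at hpar
    dsimp only
    rw [hdiv]
    omega

-- ===== VERDICT (by name: the statement is the Claim_ definition above) =====
theorem compute_spec : Claim_equal_compute := by
  intro n _
  unfold Spec_compute compute compute_alt
  rw [outer_eq n (n - 1).toNat 1 0 (by omega), alt_eq n (n - 1).toNat 1 0 (by omega) (by omega)]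
  rw [← card_sigma_eq_card_divisors n, Finset.card_sigma]
  push_cast
  rfl
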